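-- pv_equiv track=rewrite | github.com/FennexFox/SoftwareTrade | .github/scripts/perf_telemetry_automation.py | split_metadata_and_csv_metadata_only
-- ===== SOURCE A (Python) =====
-- def split_metadata_and_csv_metadata_only(document_text: str) -> tuple[dict[str, str], int | None]:
--     lines = document_text.replace("\r\n", "\n").split("\n")
--     metadata: dict[str, str] = {}
--     csv_start_index: int | None = None
--
--     for index, raw_line in enumerate(lines):
--         line = raw_line.strip()
--         if not line:
--             continue
--         if line.startswith("# "):
--             key, value = parse_metadata_line(line)
--             if key:
--                 metadata[key] = value
--             continue
--         csv_start_index = index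
--         break
--
--     return metadata, csv_start_index
--
-- def parse_metadata_line(line: str) -> tuple[str, str]:
--     key_value = line[2:]
--     if "=" not in key_value:
--         return "", ""
--     key, value = key_value.split("=", 1)
--     return key.strip(), value.strip()
-- ===== SOURCE B (Python) =====
-- def parse_metadata_line(line: str) -> tuple[str, str]:
--     key_value = line[2:]
--     if "=" not in key_value:
--         return "", ""
--     key, value = key_value.split("=", 1)
--     return key.strip(), value.strip()
--
--
-- def split_metadata_and_csv_metadata_only(document_text: str) -> tuple[dict[str, str], int | None]:
--     lines = document_text.replace("\r\n", "\n").split("\n")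
--     csv_start_index = next(
--         (i for i, raw in enumerate(lines)
--          if raw.strip() and not raw.strip().startswith("# ")),
--         None,
--     )
--     metadata: dict[str, str] = {}
--     for raw in lines[:csv_start_index]:
--         line = raw.strip()
--         if line.startswith("# "):
--             key, value = parse_metadata_line(line)
--             if key:
--                 metadata[key] = value
--     return metadata, csv_start_index
-- ===== Notes on version B (the rewrite author's own statement) =====
-- stated objective: simpler
-- what changed: A's single stateful scan with break and loop-carried dict is replaced by a two-pass decomposition: first find the index of the first non-blank non-comment line with next() over enumerate, then fold the metadata dict over the slice of lines before that index (slicing with None covering the no-CSV case).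
import Mathlib
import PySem

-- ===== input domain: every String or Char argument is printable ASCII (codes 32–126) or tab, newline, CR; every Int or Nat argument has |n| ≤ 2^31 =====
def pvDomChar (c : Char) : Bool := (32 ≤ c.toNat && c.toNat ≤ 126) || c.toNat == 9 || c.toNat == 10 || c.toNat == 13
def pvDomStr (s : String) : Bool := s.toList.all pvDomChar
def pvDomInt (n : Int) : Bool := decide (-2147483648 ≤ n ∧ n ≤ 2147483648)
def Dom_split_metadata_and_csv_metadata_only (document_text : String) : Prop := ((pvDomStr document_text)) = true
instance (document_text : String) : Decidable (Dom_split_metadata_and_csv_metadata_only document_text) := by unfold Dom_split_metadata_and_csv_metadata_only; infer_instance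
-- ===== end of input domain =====

-- B replaces A's single stateful scan by two passes: first find the index of the first
-- non-blank non-'# ' line, then fold the metadata over the slice before it (objective: simpler decomposition, same cost).

-- ===== PORT A =====
-- helper shared verbatim by Source A and Source B (parse_metadata_line)
def parse_metadata_line (line : String) : String × String :=
  let key_value := PySem.Str.slice line (some 2) none
  if PySem.Str.isIn "=" key_value then
    match PySem.Str.splitMax? key_value "=" 1 with
    | some [key, value] => (PySem.Str.strip key, PySem.Str.strip value)
    | _ => ("", "")   -- unreachable: '=' in key_value gives exactly two pieces
  else ("", "")

-- A's for-loop over enumerate(lines) with break; the local 'line = raw_line.strip()' is inlined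
def pvALoop : List (Int × String) → PySem.Dict String String →
    PySem.Dict String String × Option Int
  | [], metadata => (metadata, none)
  | (index, raw_line) :: rest, metadata =>
    if PySem.Str.strip raw_line = "" then pvALoop rest metadata
    else if PySem.Str.startswith (PySem.Str.strip raw_line) "# " then
      pvALoop rest
        (if (parse_metadata_line (PySem.Str.strip raw_line)).1 ≠ ""
         then metadata.insert (parse_metadata_line (PySem.Str.strip raw_line)).1
                (parse_metadata_line (PySem.Str.strip raw_line)).2
         else metadata)
    else (metadata, some index)

def split_metadata_and_csv_metadata_only (document_text : String) :
    (List (String × String)) × Option Int :=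
  let lines := (PySem.Str.split? (PySem.Str.replace document_text "\r\n" "\n") "\n").getD []
  let r := pvALoop (PySem.List.enumerate lines 0) PySem.Dict.empty
  (r.1.items, r.2)

-- ===== PORT B =====
-- condition of Source B's generator: raw.strip() and not raw.strip().startswith("# ")
def pvBCond (raw : String) : Bool :=
  !(PySem.Str.strip raw == "") && !(PySem.Str.startswith (PySem.Str.strip raw) "# ")

-- body of Source B's second-pass for-loop; the local 'line = raw.strip()' is inlined
def pvBStep (metadata : PySem.Dict String String) (raw : String) : PySem.Dict String String :=
  if PySem.Str.startswith (PySem.Str.strip raw) "# " then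
    if (parse_metadata_line (PySem.Str.strip raw)).1 ≠ ""
    then metadata.insert (parse_metadata_line (PySem.Str.strip raw)).1
           (parse_metadata_line (PySem.Str.strip raw)).2
    else metadata
  else metadata

def split_metadata_and_csv_metadata_only_alt (document_text : String) :
    (List (String × String)) × Option Int :=
  let lines := (PySem.Str.split? (PySem.Str.replace document_text "\r\n" "\n") "\n").getD []
  let csv_start_index :=
    ((PySem.List.enumerate lines 0).find? (fun p => pvBCond p.2)).map (·.1)
  let metadata := (PySem.List.slice lines none csv_start_index).foldl pvBStep PySem.Dict.empty
  (metadata.items, csv_start_index)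

-- ===== PRECONDITION & SPEC =====
def Spec_split_metadata_and_csv_metadata_only (document_text : String) (out : (List (String × String)) × Option Int) : Prop := out = split_metadata_and_csv_metadata_only_alt document_text
instance (document_text : String) (out : (List (String × String)) × Option Int) : Decidable (Spec_split_metadata_and_csv_metadata_only document_text out) := by unfold Spec_split_metadata_and_csv_metadata_only; infer_instance

-- ===== CLAIM (what is proved, stated in full; the proofs are below) =====
def Claim_equal_split_metadata_and_csv_metadata_only : Prop := ∀ (document_text : String), Dom_split_metadata_and_csv_metadata_only document_text → Spec_split_metadata_and_csv_metadata_only document_text (split_metadata_and_csv_metadata_only document_text)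

-- ===== LEMMAS AND PROOFS =====

theorem pvBStep_of_blank (d : PySem.Dict String String) (x : String)
    (hb : PySem.Str.strip x = "") : pvBStep d x = d := by
  unfold pvBStep
  rw [hb, show PySem.Str.startswith "" "# " = false from by decide]
  simp

-- Source B's next(...) over enumerate, related to findIdx? on the bare lines
theorem pv_find_enum (ls : List String) : ∀ (n : Int),
    ((PySem.List.enumerate ls n).find? (fun p => pvBCond p.2)).map (·.1)
      = (ls.findIdx? pvBCond).map (fun k => n + (k : Int)) := by
  induction ls with
  | nil => intro n; simp [PySem.List.enumerate]
  | cons x xs ih =>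
    intro n
    rw [PySem.List.enumerate_cons]
    by_cases hc : pvBCond x
    · simp [List.find?, hc, List.findIdx?_cons]
    · simp only [List.find?, hc, Bool.false_eq_true, if_false, List.findIdx?_cons,
        ih (n + 1)]
      cases xs.findIdx? pvBCond with
      | none => simp
      | some k => simp; ring

-- A's loop computes exactly B's decomposition (stop index and folded prefix)
theorem pv_loop_char (ls : List String) : ∀ (n : Int) (d : PySem.Dict String String),
    pvALoop (PySem.List.enumerate ls n) d =
      (match ls.findIdx? pvBCond with
       | none => (ls.foldl pvBStep d, none)
       | some k => ((ls.take k).foldl pvBStep d, some (n + (k : Int)))) := by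
  induction ls with
  | nil => intro n d; simp [PySem.List.enumerate, pvALoop]
  | cons x xs ih =>
    intro n d
    rw [PySem.List.enumerate_cons]
    show pvALoop ((n, x) :: PySem.List.enumerate xs (n + 1)) d = _
    rw [pvALoop]
    by_cases hb : PySem.Str.strip x = ""
    · have hbeq : (PySem.Str.strip x == "") = true := beq_iff_eq.mpr hb
      have hc : pvBCond x = false := by unfold pvBCond; rw [hbeq]; simp
      rw [if_pos hb, ih (n + 1)]
      simp only [List.findIdx?_cons, hc, Bool.false_eq_true, if_false]
      cases hx : xs.findIdx? pvBCond with
      | none => simp [List.foldl_cons, pvBStep_of_blank d x hb]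
      | some k =>
        simp only [Option.map_some, List.take_succ_cons, List.foldl_cons,
          pvBStep_of_blank d x hb]
        refine congrArg₂ Prod.mk rfl ?_
        congr 1
        omega
    · by_cases hsw : PySem.Str.startswith (PySem.Str.strip x) "# "
      · have hc : pvBCond x = false := by unfold pvBCond; rw [hsw]; simp
        have hstep : ∀ d' : PySem.Dict String String, pvBStep d' x =
            (if (parse_metadata_line (PySem.Str.strip x)).1 ≠ ""
             then d'.insert (parse_metadata_line (PySem.Str.strip x)).1
                    (parse_metadata_line (PySem.Str.strip x)).2
             else d') := by
          intro d'; unfold pvBStep; rw [if_pos hsw]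
        rw [if_neg hb, if_pos hsw, ih (n + 1)]
        simp only [List.findIdx?_cons, hc, Bool.false_eq_true, if_false]
        cases hx : xs.findIdx? pvBCond with
        | none => simp [List.foldl_cons, hstep]
        | some k =>
          simp only [Option.map_some, List.take_succ_cons, List.foldl_cons, hstep]
          refine congrArg₂ Prod.mk rfl ?_
          congr 1
          omega
      · have hswf : PySem.Str.startswith (PySem.Str.strip x) "# " = false :=
          Bool.eq_false_iff.mpr hsw
        have hc : pvBCond x = true := by
          unfold pvBCond
          rw [hswf, Bool.not_false, Bool.and_true, Bool.not_eq_true', beq_eq_false_iff_ne]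
          exact hb
        rw [if_neg hb, if_neg hsw]
        simp only [List.findIdx?_cons, hc]
        simp

-- ===== VERDICT (by name: the statement is the Claim_ definition above) =====
theorem split_metadata_and_csv_metadata_only_spec : Claim_equal_split_metadata_and_csv_metadata_only := by
  intro document_text _
  unfold Spec_split_metadata_and_csv_metadata_only
  unfold split_metadata_and_csv_metadata_only split_metadata_and_csv_metadata_only_alt
  dsimp only
  generalize (PySem.Str.split? (PySem.Str.replace document_text "\r\n" "\n") "\n").getD [] = ls
  rw [pv_loop_char ls 0, pv_find_enum ls 0]
  cases h : ls.findIdx? pvBCond with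
  | none => simp [PySem.List.slice_none_none]
  | some k => simp [PySem.List.slice_to_natCast]
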